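-- pv_equiv track=rewrite | github.com/JovinRyan/BandGap_ML | Encoding.py | ElementEncoding
-- ===== SOURCE A (Python) =====
-- letters = ["a", "b", "c", "d", "e", "f", "g", "h", "i", "j", "k", "l", "m", "n", "o", "p", "q", "r", "s", "t", "u", "v", "w", "x", "y", "z"]  #All lowercase letters (listed to convert ["H", "e"] -> ["He"])
--
-- def ElementEncoding(InpString: str):
--     InpString = [*InpString]
--     for i in range(len(InpString)):
--         try:
--             if InpString[i+1] in letters:
--                 InpString[i] = InpString[i] + InpString[i+1]
--                 InpString.pop(i+1)
--         except:
--             break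
--     return InpString                                            #Ex Input: "H2O" Output: ["H", "2", "O"]
-- ===== SOURCE B (Python) =====
-- import re
--
-- def ElementEncoding(InpString: str):
--     # One regex pass: each token is any one character followed by at most one
--     # ASCII lowercase letter (DOTALL so newlines are ordinary characters).
--     return re.findall(r'.[a-z]?', InpString, re.DOTALL)
-- ===== Notes on version B (the rewrite author's own statement) =====
-- stated objective: faster
-- what changed: Replaced the in-place list mutation loop (merge-then-pop inside a try/except over a stale range) with a single regular-expression scan re.findall(r'.[a-z]?', s, re.DOTALL).
import Mathlib
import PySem

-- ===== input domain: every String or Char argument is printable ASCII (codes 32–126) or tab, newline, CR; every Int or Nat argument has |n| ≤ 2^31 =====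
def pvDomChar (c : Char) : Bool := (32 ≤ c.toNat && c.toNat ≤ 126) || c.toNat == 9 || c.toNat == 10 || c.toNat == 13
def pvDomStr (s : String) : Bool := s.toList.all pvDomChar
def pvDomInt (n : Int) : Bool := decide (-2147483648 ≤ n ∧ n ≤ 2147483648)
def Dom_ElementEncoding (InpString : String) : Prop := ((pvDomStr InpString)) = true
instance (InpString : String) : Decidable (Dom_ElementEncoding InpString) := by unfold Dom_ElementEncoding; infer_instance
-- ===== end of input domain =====

-- B replaces A's in-place merge-and-pop mutation loop by a single regex-style scan
-- (re.findall(r'.[a-z]?', s, re.DOTALL)); proved to return the same token list.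

-- ===== PORT A =====
-- the module constant `letters`
def pvLetters : List String := ["a","b","c","d","e","f","g","h","i","j","k","l","m","n","o","p","q","r","s","t","u","v","w","x","y","z"]

-- the `for i in range(len(InpString))` loop: `fuel` counts the remaining range
-- iterations; the `none` branch of the indexing is the caught IndexError → break.
-- `InpString.pop(i+1)` with i+1 known in range is `eraseIdx (i+1)`.
def pvALoop (l : List String) (i : Nat) : Nat → List String
  | 0 => l
  | fuel+1 =>
    match PySem.List.pyGet? l ((i : Int) + 1) with
    | none => l
    | some nxt =>
      if pvLetters.contains nxt then
        pvALoop ((l.set i (((PySem.List.pyGet? l (i : Int)).getD "") ++ nxt)).eraseIdx (i+1)) (i+1) fuel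
      else
        pvALoop l (i+1) fuel

def ElementEncoding (InpString : String) : List String :=
  -- InpString = [*InpString]
  let l := InpString.toList.map (fun c => String.ofList [c])
  pvALoop l 0 l.length

-- ===== PORT B =====
-- the regex character class [a-z]
def pvLcChars : List Char := ['a','b','c','d','e','f','g','h','i','j','k','l','m','n','o','p','q','r','s','t','u','v','w','x','y','z']

-- the left-to-right scan re.findall(r'.[a-z]?', s, re.DOTALL) performs:
-- take any one character, absorb at most one following [a-z] character.
def pvScan : List Char → List String
  | [] => []
  | c :: [] => [String.ofList [c]]
  | c :: d :: rest =>
    if pvLcChars.contains d then String.ofList [c, d] :: pvScan rest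
    else String.ofList [c] :: pvScan (d :: rest)

def ElementEncoding_alt (InpString : String) : List String :=
  pvScan InpString.toList

-- ===== PRECONDITION & SPEC =====
def Spec_ElementEncoding (InpString : String) (out : List String) : Prop := out = ElementEncoding_alt InpString
instance (InpString : String) (out : List String) : Decidable (Spec_ElementEncoding InpString out) := by unfold Spec_ElementEncoding; infer_instance

-- ===== CLAIM (what is proved, stated in full; the proofs are below) =====
def Claim_equal_ElementEncoding : Prop := ∀ (InpString : String), Dom_ElementEncoding InpString → Spec_ElementEncoding InpString (ElementEncoding InpString)

-- ===== LEMMAS AND PROOFS =====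

theorem mem_letters (d : Char) : (String.ofList [d] ∈ pvLetters) ↔ d ∈ pvLcChars := by
  constructor
  · intro h
    simp only [pvLetters, List.mem_cons, List.not_mem_nil, or_false] at h
    rcases h with h|h|h|h|h|h|h|h|h|h|h|h|h|h|h|h|h|h|h|h|h|h|h|h|h|h <;>
      (have h2 := congrArg String.toList h; simp at h2; subst h2; decide)
  · intro h
    fin_cases h <;> decide

theorem contains_letters (d : Char) :
    pvLetters.contains (String.ofList [d]) = pvLcChars.contains d := by
  simp only [List.contains_eq_mem]
  rw [decide_eq_decide]
  exact mem_letters d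

-- loop invariant: with the first i = done.length tokens finished, A's loop
-- produces done ++ pvScan rest, as long as fuel ≥ rest.length
theorem pvALoop_eq (fuel : Nat) :
    ∀ (rest : List Char) (done : List String), rest.length ≤ fuel →
      pvALoop (done ++ rest.map (fun c => String.ofList [c])) done.length fuel
        = done ++ pvScan rest := by
  induction fuel with
  | zero =>
    intro rest done h
    have : rest = [] := List.eq_nil_of_length_eq_zero (Nat.le_zero.mp h)
    subst this
    simp [pvALoop, pvScan]
  | succ fuel ih =>
    intro rest done h
    match rest with
    | [] =>
      simp only [pvALoop, List.map_nil, List.append_nil]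
      rw [(PySem.List.pyGet?_eq_none_iff _ _).mpr (by simp [PySem.Raise.InRange])]
      simp [pvScan]
    | [c] =>
      simp only [pvALoop, List.map_cons, List.map_nil]
      rw [(PySem.List.pyGet?_eq_none_iff _ _).mpr (by simp [PySem.Raise.InRange])]
      simp [pvScan]
    | c :: d :: rest' =>
      simp only [pvALoop, List.map_cons]
      have h1 : PySem.List.pyGet?
          (done ++ String.ofList [c] :: String.ofList [d] ::
            rest'.map (fun c => String.ofList [c])) ((done.length : Int) + 1)
          = some (String.ofList [d]) := by
        have := PySem.List.pyGet?_append_right done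
          (String.ofList [c] :: String.ofList [d] ::
            rest'.map (fun c => String.ofList [c])) 1
        simpa using this
      rw [h1]
      simp only []
      rw [contains_letters]
      by_cases hd : pvLcChars.contains d = true
      · rw [if_pos hd]
        rw [PySem.List.pyGet?_append_length]
        rw [List.set_append_right _ _ (Nat.le_refl _), Nat.sub_self, List.set_cons_zero]
        rw [List.eraseIdx_append_of_length_le (Nat.le_succ _)]
        have hidx : done.length + 1 - done.length = 1 := by omega
        rw [hidx, List.eraseIdx_cons_succ, List.eraseIdx_cons_zero]
        have hcd : String.ofList [c] ++ String.ofList [d] = String.ofList [c, d] := by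
          simpa using (String.ofList_append (l₁ := [c]) (l₂ := [d])).symm
        rw [Option.getD_some, hcd]
        have hrw : done ++ String.ofList [c, d] :: rest'.map (fun c => String.ofList [c])
            = (done ++ [String.ofList [c, d]]) ++ rest'.map (fun c => String.ofList [c]) := by
          simp
        have hlen : done.length + 1 = (done ++ [String.ofList [c, d]]).length := by simp
        rw [hrw, hlen, ih rest' _ (by simp at h; omega)]
        have hd' : d ∈ pvLcChars := by simpa [List.contains_eq_mem] using hd
        simp [pvScan, hd']
      · rw [if_neg hd]
        have hrw : done ++ String.ofList [c] :: String.ofList [d] ::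
              rest'.map (fun c => String.ofList [c])
            = (done ++ [String.ofList [c]]) ++ (d :: rest').map (fun c => String.ofList [c]) := by
          simp
        have hlen : done.length + 1 = (done ++ [String.ofList [c]]).length := by simp
        rw [hrw, hlen, ih (d :: rest') _ (by simp at h ⊢; omega)]
        have hd' : d ∉ pvLcChars := by simpa [List.contains_eq_mem] using hd
        simp [pvScan, hd']

theorem ElementEncoding_eq_alt (s : String) : ElementEncoding s = ElementEncoding_alt s := by
  unfold ElementEncoding ElementEncoding_alt
  have := pvALoop_eq (s.toList.map (fun c => String.ofList [c])).length s.toList []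
    (by simp)
  simpa using this

-- ===== VERDICT (by name: the statement is the Claim_ definition above) =====
theorem ElementEncoding_spec : Claim_equal_ElementEncoding := by
  intro s _
  unfold Spec_ElementEncoding
  exact ElementEncoding_eq_alt s
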